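-- pv_equiv track=rewrite | github.com/Matthiaesss/2022_S1_CS373_AssignmentSkeleton | CS373LicensePlateDetection.py | computeErosion8Nbh3x3FlatSE
-- ===== SOURCE A (Python) =====
-- def createInitializedGreyscalePixelArray(image_width, image_height, initValue = 0):
--
--     new_array = [[initValue for x in range(image_width)] for y in range(image_height)]
--     return new_array
--
-- def computeErosion8Nbh3x3FlatSE(pixel_array, image_width, image_height):
--     greyScale = createInitializedGreyscalePixelArray(image_width, image_height)
--     tempList = []
--     for i in range(1, image_height - 1):
--         for j in range(1, image_width - 1):
--             if pixel_array[i - 1][j - 1] > 0: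
--                 if pixel_array[i - 1][j] > 0:
--                     if pixel_array[i - 1][j + 1] > 0:
--                         if pixel_array[i][j - 1] > 0:
--                             if pixel_array[i][j] > 0:
--                                 if pixel_array[i][j + 1] > 0:
--                                     if pixel_array[i + 1][j - 1] > 0:
--                                         if pixel_array[i + 1][j] > 0:
--                                             if pixel_array[i + 1][j + 1] > 0:
--                                                 greyScale[i][j] = 1
--             else:
--                 greyScale[i][j] = 0
--
--     return greyScale
-- ===== SOURCE B (Python) =====
-- # Separable 3x3 erosion: a horizontal 1x3 pass building an intermediate table,
-- # then a vertical 3x1 pass, both as comprehensions (no in-place mutation).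
-- # Images with no interior pixels (height or width < 3) are all-zero, returned at once.
-- def computeErosion8Nbh3x3FlatSE(pixel_array, image_width, image_height):
--     if image_height < 3 or image_width < 3:
--         return [[0 for _ in range(image_width)] for _ in range(image_height)]
--     inter = [[1 if 0 < j < image_width - 1
--                  and pixel_array[r][j - 1] > 0
--                  and pixel_array[r][j] > 0
--                  and pixel_array[r][j + 1] > 0
--               else 0
--               for j in range(image_width)]
--              for r in range(image_height)]
--     return [[1 if 0 < i < image_height - 1 and 0 < j < image_width - 1
--                 and inter[i - 1][j] == 1 and inter[i][j] == 1 and inter[i + 1][j] == 1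
--              else 0
--              for j in range(image_width)]
--             for i in range(image_height)]
-- ===== Notes on version B (the rewrite author's own statement) =====
-- stated objective: alternative
-- what changed: Replaces the single nested loop with nine-deep if-nesting that mutates a zero grid by a separable erosion: a horizontal 1x3 pass building an intermediate table by comprehension, then a vertical 3x1 pass over that table (3 reads per pixel instead of 9), with an early all-zero return when the image has no interior pixels.
import Mathlib
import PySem

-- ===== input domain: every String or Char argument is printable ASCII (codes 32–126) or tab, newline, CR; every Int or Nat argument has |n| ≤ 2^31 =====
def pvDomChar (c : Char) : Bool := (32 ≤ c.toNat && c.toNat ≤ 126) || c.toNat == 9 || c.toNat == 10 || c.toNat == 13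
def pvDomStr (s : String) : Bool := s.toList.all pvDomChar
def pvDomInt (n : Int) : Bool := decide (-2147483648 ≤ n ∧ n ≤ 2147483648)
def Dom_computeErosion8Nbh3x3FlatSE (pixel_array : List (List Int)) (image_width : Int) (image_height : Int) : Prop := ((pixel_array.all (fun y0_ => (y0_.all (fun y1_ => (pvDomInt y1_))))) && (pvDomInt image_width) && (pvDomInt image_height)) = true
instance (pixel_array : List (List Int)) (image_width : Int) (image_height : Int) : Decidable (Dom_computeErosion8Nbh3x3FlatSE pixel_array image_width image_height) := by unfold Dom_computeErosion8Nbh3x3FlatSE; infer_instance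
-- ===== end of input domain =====

-- B replaces A's mutating nine-deep-if loop by a separable erosion (horizontal 1x3 pass into an
-- intermediate table, then a vertical 3x1 pass), built by comprehensions; same cost class.

-- shared 2D read helper: pixel_array[i][j]; exact whenever the Python access succeeds
-- (Pre_ guarantees every access either port makes is in range)
def pvGet2 (pa : List (List Int)) (i j : Int) : Int :=
  PySem.List.pyGetD (PySem.List.pyGetD pa i []) j 0

-- ===== PORT A =====
-- greyScale[i][j] = v (indices are in range under the loop bounds; pySetD is exact there)
def pvSet2 (g : List (List Int)) (i j v : Int) : List (List Int) :=
  PySem.List.pySetD g i (PySem.List.pySetD (PySem.List.pyGetD g i []) j v)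

-- the body of A's inner j-loop, literal nine-deep if nesting
def pvAInner (pa : List (List Int)) (i : Int) (g : List (List Int)) (j : Int) : List (List Int) :=
  if pvGet2 pa (i-1) (j-1) > 0 then
    if pvGet2 pa (i-1) j > 0 then
      if pvGet2 pa (i-1) (j+1) > 0 then
        if pvGet2 pa i (j-1) > 0 then
          if pvGet2 pa i j > 0 then
            if pvGet2 pa i (j+1) > 0 then
              if pvGet2 pa (i+1) (j-1) > 0 then
                if pvGet2 pa (i+1) j > 0 then
                  if pvGet2 pa (i+1) (j+1) > 0 then
                    pvSet2 g i j 1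
                  else g
                else g
              else g
            else g
          else g
        else g
      else g
    else g
  else pvSet2 g i j 0

-- the body of A's outer i-loop
def pvAOuter (pa : List (List Int)) (w : Int) (g : List (List Int)) (i : Int) : List (List Int) :=
  (PySem.List.pyRange 1 (w - 1) 1).foldl (pvAInner pa i) g

def computeErosion8Nbh3x3FlatSE (pixel_array : List (List Int)) (image_width : Int) (image_height : Int) : List (List Int) :=
  -- createInitializedGreyscalePixelArray image_width image_height 0
  let greyScale := (PySem.List.pyRange 0 image_height 1).map (fun _y =>
    (PySem.List.pyRange 0 image_width 1).map (fun _x => (0 : Int)))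
  (PySem.List.pyRange 1 (image_height - 1) 1).foldl (pvAOuter pixel_array image_width) greyScale

-- ===== PORT B =====
-- one row of the horizontal 1x3 erosion (the inner comprehension of `inter`)
def pvHRow (pa : List (List Int)) (w r : Int) : List Int :=
  (PySem.List.pyRange 0 w 1).map (fun j =>
    if 0 < j ∧ j < w - 1 ∧ pvGet2 pa r (j-1) > 0 ∧ pvGet2 pa r j > 0 ∧ pvGet2 pa r (j+1) > 0
    then (1 : Int) else 0)

def computeErosion8Nbh3x3FlatSE_alt (pixel_array : List (List Int)) (image_width : Int) (image_height : Int) : List (List Int) :=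
  if image_height < 3 ∨ image_width < 3 then
    -- no interior pixels: the all-zero grid, returned at once
    (PySem.List.pyRange 0 image_height 1).map (fun _i =>
      (PySem.List.pyRange 0 image_width 1).map (fun _j => (0 : Int)))
  else
    let inter := (PySem.List.pyRange 0 image_height 1).map (fun r => pvHRow pixel_array image_width r)
    (PySem.List.pyRange 0 image_height 1).map (fun i =>
      (PySem.List.pyRange 0 image_width 1).map (fun j =>
        if 0 < i ∧ i < image_height - 1 ∧ 0 < j ∧ j < image_width - 1 ∧
           pvGet2 inter (i-1) j = 1 ∧ pvGet2 inter i j = 1 ∧ pvGet2 inter (i+1) j = 1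
        then (1 : Int) else 0))

-- ===== PRECONDITION & SPEC =====
-- Pre_ excludes exactly the ragged/undersized arrays of an image claiming interior pixels
-- (width ≥ 3 and height ≥ 3 but rows 0..height-1 missing or shorter than width): there the Python A
-- either raises IndexError or returns only because its data-dependent short-circuiting happens to
-- skip the missing cells, an accident of evaluation order no re-implementation can reproduce.
def Pre_computeErosion8Nbh3x3FlatSE (pixel_array : List (List Int)) (image_width : Int) (image_height : Int) : Prop :=
  (3 ≤ image_width ∧ 3 ≤ image_height) →
    (image_height.toNat ≤ pixel_array.length ∧
     ∀ row ∈ pixel_array.take image_height.toNat, image_width ≤ (row.length : Int))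
instance (pixel_array : List (List Int)) (image_width : Int) (image_height : Int) : Decidable (Pre_computeErosion8Nbh3x3FlatSE pixel_array image_width image_height) := by unfold Pre_computeErosion8Nbh3x3FlatSE; infer_instance

def pvWitness_computeErosion8Nbh3x3FlatSE : List (List Int) × Int × Int :=
  ([[1,1,1],[1,1,1],[1,1,1]], 3, 3)

def Spec_computeErosion8Nbh3x3FlatSE (pixel_array : List (List Int)) (image_width : Int) (image_height : Int) (out : List (List Int)) : Prop := out = computeErosion8Nbh3x3FlatSE_alt pixel_array image_width image_height
instance (pixel_array : List (List Int)) (image_width : Int) (image_height : Int) (out : List (List Int)) : Decidable (Spec_computeErosion8Nbh3x3FlatSE pixel_array image_width image_height out) := by unfold Spec_computeErosion8Nbh3x3FlatSE; infer_instance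

-- ===== CLAIM (what is proved, stated in full; the proofs are below) =====
def Claim_equal_computeErosion8Nbh3x3FlatSE : Prop := ∀ (pixel_array : List (List Int)) (image_width : Int) (image_height : Int), Dom_computeErosion8Nbh3x3FlatSE pixel_array image_width image_height → Pre_computeErosion8Nbh3x3FlatSE pixel_array image_width image_height → Spec_computeErosion8Nbh3x3FlatSE pixel_array image_width image_height (computeErosion8Nbh3x3FlatSE pixel_array image_width image_height)

-- ===== LEMMAS AND PROOFS =====

-- the grid [[F i j for j in range(w)] for i in range(h)]
def pvGridOf (w h : Int) (F : Int → Int → Int) : List (List Int) :=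
  (PySem.List.pyRange 0 h 1).map (fun i => (PySem.List.pyRange 0 w 1).map (fun j => F i j))

-- the value A's inner-loop body leaves at cell (i,j) given its previous value
def pvUpd (pa : List (List Int)) (i j old : Int) : Int :=
  if pvGet2 pa (i-1) (j-1) > 0 then
    if pvGet2 pa (i-1) j > 0 ∧ pvGet2 pa (i-1) (j+1) > 0 ∧ pvGet2 pa i (j-1) > 0 ∧
       pvGet2 pa i j > 0 ∧ pvGet2 pa i (j+1) > 0 ∧ pvGet2 pa (i+1) (j-1) > 0 ∧
       pvGet2 pa (i+1) j > 0 ∧ pvGet2 pa (i+1) (j+1) > 0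
    then 1 else old
  else 0

lemma pvUpd_idem (pa : List (List Int)) (i j x : Int) :
    pvUpd pa i j (pvUpd pa i j x) = pvUpd pa i j x := by
  unfold pvUpd; split_ifs <;> rfl

lemma pvGridOf_congr {w h : Int} {F G : Int → Int → Int}
    (hFG : ∀ i j, 0 ≤ i → i < h → 0 ≤ j → j < w → F i j = G i j) :
    pvGridOf w h F = pvGridOf w h G := by
  unfold pvGridOf
  apply List.map_congr_left
  intro i hi
  rw [PySem.List.mem_pyRange_one] at hi
  apply List.map_congr_left
  intro j hj
  rw [PySem.List.mem_pyRange_one] at hj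
  exact hFG i j hi.1 hi.2 hj.1 hj.2

lemma pvGet2_gridOf {w h : Int} (F : Int → Int → Int) {i j : Int}
    (hi0 : 0 ≤ i) (hih : i < h) (hj0 : 0 ≤ j) (hjw : j < w) :
    pvGet2 (pvGridOf w h F) i j = F i j := by
  unfold pvGet2 pvGridOf
  rw [PySem.List.pyGetD_map_pyRange_of_nonneg _ _ _ _ hi0 hih,
      PySem.List.pyGetD_map_pyRange_of_nonneg _ _ _ _ hj0 hjw]

lemma pvSetD_map_pyRange {α : Type} (f : Int → α) (n i : Int) (v : α) (hi0 : 0 ≤ i) :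
    PySem.List.pySetD ((PySem.List.pyRange 0 n 1).map f) i v
      = (PySem.List.pyRange 0 n 1).map (fun k => if k = i then v else f k) := by
  rw [PySem.List.pySetD_of_nonneg _ _ hi0]
  apply List.ext_getElem
  · simp
  · intro k hk1 hk2
    simp only [List.getElem_set, List.getElem_map]
    have hk : k < (PySem.List.pyRange 0 n 1).length := by simpa using hk2
    rw [PySem.List.getElem_pyRange_one]
    by_cases h : i.toNat = k
    · have hki : (k : Int) = i := by omega
      simp [h, hki]
    · have hki : ¬ (k : Int) = i := by omega
      simp [h, hki]

lemma pvSet2_gridOf {w h : Int} (F : Int → Int → Int) {i j : Int} (v : Int)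
    (hi0 : 0 ≤ i) (hih : i < h) (hj0 : 0 ≤ j) (hjw : j < w) :
    pvSet2 (pvGridOf w h F) i j v
      = pvGridOf w h (fun i' j' => if i' = i ∧ j' = j then v else F i' j') := by
  unfold pvSet2
  have hrow : PySem.List.pyGetD (pvGridOf w h F) i []
      = (PySem.List.pyRange 0 w 1).map (fun j' => F i j') := by
    unfold pvGridOf
    rw [PySem.List.pyGetD_map_pyRange_of_nonneg _ _ _ _ hi0 hih]
  rw [hrow, pvSetD_map_pyRange _ _ _ _ hj0]
  show PySem.List.pySetD (pvGridOf w h F) i _ = _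
  conv_lhs => rw [pvGridOf]
  rw [pvSetD_map_pyRange _ _ _ _ hi0]
  unfold pvGridOf
  apply List.map_congr_left
  intro i' hi'
  by_cases h' : i' = i
  · subst h'
    simp only [reduceIte, true_and]
  · simp only [if_neg h']
    apply List.map_congr_left
    intro j' _
    simp [h']

lemma pvAInner_eq (pa : List (List Int)) (i : Int) (g : List (List Int)) (j : Int) :
    pvAInner pa i g j =
      if pvGet2 pa (i-1) (j-1) > 0 then
        if pvGet2 pa (i-1) j > 0 ∧ pvGet2 pa (i-1) (j+1) > 0 ∧ pvGet2 pa i (j-1) > 0 ∧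
           pvGet2 pa i j > 0 ∧ pvGet2 pa i (j+1) > 0 ∧ pvGet2 pa (i+1) (j-1) > 0 ∧
           pvGet2 pa (i+1) j > 0 ∧ pvGet2 pa (i+1) (j+1) > 0
        then pvSet2 g i j 1 else g
      else pvSet2 g i j 0 := by
  unfold pvAInner
  split_ifs <;> first | rfl | tauto

lemma pvAInner_gridOf {w h : Int} (pa : List (List Int)) (F : Int → Int → Int) {i j : Int}
    (hi0 : 0 ≤ i) (hih : i < h) (hj0 : 0 ≤ j) (hjw : j < w) :
    pvAInner pa i (pvGridOf w h F) j
      = pvGridOf w h (fun i' j' => if i' = i ∧ j' = j then pvUpd pa i j (F i j) else F i' j') := by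
  rw [pvAInner_eq]
  unfold pvUpd
  split_ifs with h1 h2
  · exact pvSet2_gridOf F 1 hi0 hih hj0 hjw
  · apply pvGridOf_congr
    intro a b _ _ _ _
    by_cases hab : a = i ∧ b = j
    · obtain ⟨rfl, rfl⟩ := hab; simp
    · simp [hab]
  · exact pvSet2_gridOf F 0 hi0 hih hj0 hjw

lemma pvFoldA_js {w h : Int} (pa : List (List Int)) {i : Int} (hi0 : 0 ≤ i) (hih : i < h)
    (js : List Int) (hjs : ∀ j ∈ js, 0 ≤ j ∧ j < w) (F : Int → Int → Int) :
    js.foldl (pvAInner pa i) (pvGridOf w h F)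
      = pvGridOf w h
          (fun i' j' => if i' = i ∧ j' ∈ js then pvUpd pa i j' (F i' j') else F i' j') := by
  induction js generalizing F with
  | nil =>
    simp only [List.foldl_nil]
    apply pvGridOf_congr; intro a b _ _ _ _; simp
  | cons j js ih =>
    simp only [List.foldl_cons]
    have hj := hjs j (List.mem_cons_self ..)
    rw [pvAInner_gridOf pa F hi0 hih hj.1 hj.2,
        ih (fun j' hj' => hjs j' (List.mem_cons_of_mem _ hj'))]
    apply pvGridOf_congr
    intro a b _ _ _ _
    by_cases ha : a = i
    · subst ha
      by_cases hbj : b = j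
      · subst hbj
        by_cases hbs : b ∈ js <;>
          simp [hbs, List.mem_cons, pvUpd_idem]
      · by_cases hbs : b ∈ js <;> simp [hbs, hbj, List.mem_cons]
    · simp [ha]

lemma pvAOuter_gridOf {w h : Int} (pa : List (List Int)) (F : Int → Int → Int) {i : Int}
    (hi0 : 0 ≤ i) (hih : i < h) :
    pvAOuter pa w (pvGridOf w h F) i
      = pvGridOf w h
          (fun i' j' => if i' = i ∧ 1 ≤ j' ∧ j' < w - 1 then pvUpd pa i j' (F i' j') else F i' j') := by
  unfold pvAOuter
  rw [pvFoldA_js pa hi0 hih _ (fun j hj => by rw [PySem.List.mem_pyRange_one] at hj; omega) F]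
  apply pvGridOf_congr
  intro a b _ _ _ _
  simp [PySem.List.mem_pyRange_one]

lemma pvFoldA_is {w h : Int} (pa : List (List Int))
    (is : List Int) (his : ∀ i ∈ is, 0 ≤ i ∧ i < h) (F : Int → Int → Int) :
    is.foldl (pvAOuter pa w) (pvGridOf w h F)
      = pvGridOf w h
          (fun i' j' => if i' ∈ is ∧ 1 ≤ j' ∧ j' < w - 1 then pvUpd pa i' j' (F i' j') else F i' j') := by
  induction is generalizing F with
  | nil =>
    simp only [List.foldl_nil]
    apply pvGridOf_congr; intro a b _ _ _ _; simp
  | cons i is ih =>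
    simp only [List.foldl_cons]
    have hi := his i (List.mem_cons_self ..)
    rw [pvAOuter_gridOf pa F hi.1 hi.2,
        ih (fun i' hi' => his i' (List.mem_cons_of_mem _ hi'))]
    apply pvGridOf_congr
    intro a b _ _ _ _
    by_cases hb : 1 ≤ b ∧ b < w - 1
    · by_cases hai : a = i
      · subst hai
        by_cases has : a ∈ is <;> simp [has, hb, List.mem_cons, pvUpd_idem]
      · by_cases has : a ∈ is <;> simp [has, hai, hb, List.mem_cons]
    · simp [hb]

lemma pvA_as_grid (pa : List (List Int)) (w h : Int) :
    computeErosion8Nbh3x3FlatSE pa w h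
      = pvGridOf w h
          (fun i j => if (1 ≤ i ∧ i < h - 1) ∧ 1 ≤ j ∧ j < w - 1 then pvUpd pa i j 0 else 0) := by
  show (PySem.List.pyRange 1 (h-1) 1).foldl (pvAOuter pa w) (pvGridOf w h (fun _ _ => 0)) = _
  rw [pvFoldA_is pa _ (fun i hi => by rw [PySem.List.mem_pyRange_one] at hi; omega) _]
  apply pvGridOf_congr
  intro a b _ _ _ _
  simp [PySem.List.mem_pyRange_one]

lemma pvIfOneZero_eq_one (c : Prop) [Decidable c] :
    ((if c then (1:Int) else 0) = 1) ↔ c := by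
  split_ifs with hc <;> simp [hc]

-- ===== VERDICT (by name: the statement is the Claim_ definition above) =====
theorem computeErosion8Nbh3x3FlatSE_spec : Claim_equal_computeErosion8Nbh3x3FlatSE := by
  intro pa w h _ _
  unfold Spec_computeErosion8Nbh3x3FlatSE computeErosion8Nbh3x3FlatSE_alt
  rw [pvA_as_grid]
  by_cases hg : h < 3 ∨ w < 3
  · rw [if_pos hg]
    show pvGridOf w h _ = pvGridOf w h (fun _ _ => (0 : Int))
    apply pvGridOf_congr
    intro i j _ _ _ _
    rw [if_neg]
    rintro ⟨⟨hi1, hi2⟩, hj1, hj2⟩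
    omega
  · rw [if_neg hg]
    show _ = (PySem.List.pyRange 0 h 1).map (fun i =>
      (PySem.List.pyRange 0 w 1).map (fun j =>
        if 0 < i ∧ i < h - 1 ∧ 0 < j ∧ j < w - 1 ∧
           pvGet2 ((PySem.List.pyRange 0 h 1).map (fun r => pvHRow pa w r)) (i-1) j = 1 ∧
           pvGet2 ((PySem.List.pyRange 0 h 1).map (fun r => pvHRow pa w r)) i j = 1 ∧
           pvGet2 ((PySem.List.pyRange 0 h 1).map (fun r => pvHRow pa w r)) (i+1) j = 1
        then (1 : Int) else 0))
    have hinter : ((PySem.List.pyRange 0 h 1).map (fun r => pvHRow pa w r))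
        = pvGridOf w h (fun r j => if 0 < j ∧ j < w - 1 ∧ pvGet2 pa r (j-1) > 0 ∧ pvGet2 pa r j > 0 ∧ pvGet2 pa r (j+1) > 0 then (1:Int) else 0) := rfl
    rw [hinter]
    show pvGridOf w h _ = pvGridOf w h _
    apply pvGridOf_congr
    intro i j hi0 hih hj0 hjw
    by_cases hint : 0 < i ∧ i < h - 1 ∧ 0 < j ∧ j < w - 1
    · obtain ⟨hi1, hi2, hj1, hj2⟩ := hint
      rw [pvGet2_gridOf _ (by omega) (by omega) hj0 hjw,
          pvGet2_gridOf _ (by omega) (by omega) hj0 hjw,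
          pvGet2_gridOf _ (by omega) (by omega) hj0 hjw]
      simp only [pvIfOneZero_eq_one, hj1, hj2, true_and]
      unfold pvUpd
      split_ifs <;> first | rfl | tauto
    · rw [if_neg, if_neg]
      · intro hc
        exact hint ⟨hc.1, hc.2.1, hc.2.2.1, hc.2.2.2.1⟩
      · intro hc
        exact hint ⟨by omega, hc.1.2, by omega, hc.2.2⟩
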